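-- pv_equiv track=rewrite | github.com/nicepyprod/csv-surgeon | csv_surgeon/flatten.py | collapse_column
-- ===== SOURCE A (Python) =====
-- from typing import Iterable, Iterator
--
-- def collapse_column(
--     rows: Iterable[dict],
--     column: str,
--     key_column: str,
--     sep: str = "|",
-- ) -> Iterator[dict]:
--     """Inverse of flatten: group rows sharing *key_column* and join *column* values.
--
--     Rows are consumed eagerly per key group (stable order preserved).
--     """
--     seen: dict[str, dict] = {}
--     order: list[str] = []
--     groups: dict[str, list[str]] = {}
--
--     for row in rows:
--         key = row.get(key_column, "")
--         if key not in seen: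
--             seen[key] = {k: v for k, v in row.items() if k != column}
--             order.append(key)
--             groups[key] = []
--         val = row.get(column, "")
--         if val:
--             groups[key].append(val)
--
--     for key in order:
--         yield {**seen[key], column: sep.join(groups[key])}
-- ===== SOURCE B (Python) =====
-- def collapse_column(rows, column, key_column, sep="|"):
--     """Repeatedly partition the remaining rows on the first row's key (no dict/grouping
--     table at all): peel off one key group per round and emit its collapsed row."""
--     pending = list(rows)
--     while pending:
--         first = pending[0]
--         key = first.get(key_column, "")
--         same = [first]
--         rest = []
--         for r in pending[1:]:
--             (same if r.get(key_column, "") == key else rest).append(r)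
--         out = {k: v for k, v in first.items() if k != column}
--         out[column] = sep.join(v for r in same if (v := r.get(column, "")))
--         yield out
--         pending = rest
-- ===== Notes on version B (the rewrite author's own statement) =====
-- stated objective: alternative
-- what changed: Replaces A's single hashed pass with three parallel accumulators (seen templates, key order, per-key value lists) by a dict-free repeated-partition loop: each round partitions the remaining rows on the first row's key, emits that group's collapsed row, and continues on the rest.
import Mathlib
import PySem

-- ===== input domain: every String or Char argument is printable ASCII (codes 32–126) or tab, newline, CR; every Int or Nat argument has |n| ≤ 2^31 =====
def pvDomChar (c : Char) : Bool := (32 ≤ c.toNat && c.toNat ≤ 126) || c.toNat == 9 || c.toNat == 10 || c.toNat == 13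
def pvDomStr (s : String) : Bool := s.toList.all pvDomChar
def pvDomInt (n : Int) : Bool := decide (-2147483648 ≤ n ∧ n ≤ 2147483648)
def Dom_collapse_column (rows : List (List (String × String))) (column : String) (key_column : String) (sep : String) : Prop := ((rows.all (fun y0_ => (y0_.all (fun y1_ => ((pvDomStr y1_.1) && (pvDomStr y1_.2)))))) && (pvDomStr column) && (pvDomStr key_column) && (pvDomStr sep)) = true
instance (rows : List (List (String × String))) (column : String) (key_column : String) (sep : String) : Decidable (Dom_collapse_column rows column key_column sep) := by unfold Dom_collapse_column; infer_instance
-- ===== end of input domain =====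

-- B uses no dict/hash grouping at all: it repeatedly PARTITIONS the remaining rows on the first
-- row's key, emitting one collapsed row per round (objective: alternative algorithm, same return
-- value). Rows (Python dicts) are marshalled as assoc lists and read through PySem.Dict.ofList
-- (= Python's dict construction).

-- ===== PORT A =====
-- one loop iteration of A over state (seen, order, groups)
def pvAStep (column key_column : String)
    (st : PySem.Dict String (List (String × String)) × List String × PySem.Dict String (List String))
    (row : List (String × String)) :
    PySem.Dict String (List (String × String)) × List String × PySem.Dict String (List String) :=
  let rowd := PySem.Dict.ofList row
  let key := rowd.getD key_column ""
  let seen := st.1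
  let order := st.2.1
  let groups := st.2.2
  let st' :=
    if seen.contains key then (seen, order, groups)
    else (seen.insert key (rowd.items.filter (fun p => p.1 ≠ column)),
          order ++ [key],
          groups.insert key ([] : List String))
  let val := rowd.getD column ""
  if val ≠ "" then (st'.1, st'.2.1, st'.2.2.modify key [] (· ++ [val])) else st'

def collapse_column (rows : List (List (String × String))) (column : String) (key_column : String) (sep : String) : List (List (String × String)) :=
  let st := rows.foldl (pvAStep column key_column) (PySem.Dict.empty, [], PySem.Dict.empty)
  st.2.1.map (fun key =>
    st.1.getD key [] ++ [(column, PySem.Str.join sep (st.2.2.getD key []))])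

-- ===== PORT B =====
-- Source B's while loop as recursion on `pending`; the one-pass (same, rest) partition of
-- pending[1:] is List.partition.
def collapse_column_alt (rows : List (List (String × String))) (column : String) (key_column : String) (sep : String) : List (List (String × String)) :=
  match rows with
  | [] => []
  | first :: tl =>
    let key := (PySem.Dict.ofList first).getD key_column ""
    let p := tl.partition (fun r => (PySem.Dict.ofList r).getD key_column "" == key)
    let same := first :: p.1
    ((PySem.Dict.ofList first).items.filter (fun q => q.1 ≠ column) ++
      [(column, PySem.Str.join sep
        ((same.map (fun r => (PySem.Dict.ofList r).getD column "")).filter (· ≠ "")))])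
      :: collapse_column_alt p.2 column key_column sep
termination_by rows.length
decreasing_by
  simp only [List.partition_eq_filter_filter]
  exact Nat.lt_succ_of_le (List.length_filter_le _ _)

-- ===== PRECONDITION & SPEC =====
def Spec_collapse_column (rows : List (List (String × String))) (column : String) (key_column : String) (sep : String) (out : List (List (String × String))) : Prop := out = collapse_column_alt rows column key_column sep
instance (rows : List (List (String × String))) (column : String) (key_column : String) (sep : String) (out : List (List (String × String))) : Decidable (Spec_collapse_column rows column key_column sep out) := by unfold Spec_collapse_column; infer_instance

-- ===== CLAIM (what is proved, stated in full; the proofs are below) =====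
def Claim_equal_collapse_column : Prop := ∀ (rows : List (List (String × String))) (column : String) (key_column : String) (sep : String), Dom_collapse_column rows column key_column sep → Spec_collapse_column rows column key_column sep (collapse_column rows column key_column sep)

-- ===== LEMMAS AND PROOFS =====

-- proof-only abbreviations: row.get(key_column, ""), row.get(column, ""), the filtered template
def pvKeyOf (key_column : String) (r : List (String × String)) : String :=
  (PySem.Dict.ofList r).getD key_column ""
def pvValOf (column : String) (r : List (String × String)) : String :=
  (PySem.Dict.ofList r).getD column ""
def pvTmpl (column : String) (r : List (String × String)) : List (String × String) :=
  (PySem.Dict.ofList r).items.filter (fun p => p.1 ≠ column)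

-- common normal form of both outputs: for each key in first-occurrence order, the first matching
-- row's template followed by (column, join of the non-empty column values of its rows)
def pvSpecList (rows : List (List (String × String))) (column key_column sep : String) : List (List (String × String)) :=
  (PySem.Set.ofList (rows.map (pvKeyOf key_column))).map (fun k =>
    pvTmpl column ((rows.filter (fun r => pvKeyOf key_column r == k)).headD []) ++
    [(column, PySem.Str.join sep
      (((rows.filter (fun r => pvKeyOf key_column r == k)).map (pvValOf column)).filter (· ≠ "")))])

theorem pvAStep_eq (column key_column : String)
    (st : PySem.Dict String (List (String × String)) × List String × PySem.Dict String (List String))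
    (r : List (String × String)) :
    pvAStep column key_column st r =
      ((if st.1.contains (pvKeyOf key_column r) then st.1
        else st.1.insert (pvKeyOf key_column r) (pvTmpl column r)),
       (if st.1.contains (pvKeyOf key_column r) then st.2.1 else st.2.1 ++ [pvKeyOf key_column r]),
       (let g := if st.1.contains (pvKeyOf key_column r) then st.2.2
                 else st.2.2.insert (pvKeyOf key_column r) ([] : List String)
        if pvValOf column r ≠ "" then g.modify (pvKeyOf key_column r) [] (· ++ [pvValOf column r])
        else g)) := by
  simp only [pvAStep, pvKeyOf, pvValOf, pvTmpl]
  split_ifs <;> rfl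

theorem pvAFold_char (column key_column : String) (l : List (List (String × String))) :
    (l.foldl (pvAStep column key_column) (PySem.Dict.empty, [], PySem.Dict.empty)).2.1
      = PySem.Set.ofList (l.map (pvKeyOf key_column))
  ∧ (∀ k, (l.foldl (pvAStep column key_column) (PySem.Dict.empty, [], PySem.Dict.empty)).1.get? k
      = ((l.filter (fun r => pvKeyOf key_column r == k)).head?).map (pvTmpl column))
  ∧ (∀ k, (l.foldl (pvAStep column key_column) (PySem.Dict.empty, [], PySem.Dict.empty)).2.2.getD k []
      = ((l.filter (fun r => pvKeyOf key_column r == k)).map (pvValOf column)).filter (· ≠ "")) := by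
  induction l using List.reverseRecOn with
  | nil => simp [PySem.Dict.get?_empty, PySem.Dict.getD_empty]
  | append_singleton l r ih =>
    obtain ⟨ho, hs, hg⟩ := ih
    set st := l.foldl (pvAStep column key_column) (PySem.Dict.empty, [], PySem.Dict.empty) with hst
    have hcont : st.1.contains (pvKeyOf key_column r)
        = ((l.filter (fun r' => pvKeyOf key_column r' == pvKeyOf key_column r)).head?).isSome := by
      rw [PySem.Dict.contains_eq_isSome_get?, hs, Option.isSome_map]
    have hofl : PySem.Set.ofList ((l ++ [r]).map (pvKeyOf key_column))
        = PySem.Set.add (PySem.Set.ofList (l.map (pvKeyOf key_column))) (pvKeyOf key_column r) := by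
      simp [PySem.Set.ofList_eq_foldl, List.foldl_append]
    have hfa : ∀ k, (l ++ [r]).filter (fun r' => pvKeyOf key_column r' == k)
        = l.filter (fun r' => pvKeyOf key_column r' == k)
          ++ (if pvKeyOf key_column r = k then [r] else []) := by
      intro k; rw [List.filter_append]; congr 1; split_ifs with h <;> simp [h]
    simp only [List.foldl_append, List.foldl_cons, List.foldl_nil, ← hst, pvAStep_eq]
    cases hhd : (l.filter (fun r' => pvKeyOf key_column r' == pvKeyOf key_column r)).head? with
    | none =>
      have hfil : l.filter (fun r' => pvKeyOf key_column r' == pvKeyOf key_column r) = [] :=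
        List.head?_eq_none_iff.mp hhd
      have hnm : pvKeyOf key_column r ∉ l.map (pvKeyOf key_column) := by
        intro hm
        obtain ⟨r', hr', he⟩ := List.mem_map.mp hm
        exact (List.filter_eq_nil_iff.mp hfil r' hr') (by simp [he])
      have hcf : st.1.contains (pvKeyOf key_column r) = false := by rw [hcont, hhd]; rfl
      rw [hcf]
      simp only [Bool.false_eq_true, if_false]
      refine ⟨?_, ?_, ?_⟩
      · rw [hofl, ho]
        simp [PySem.Set.add]
        intro x hx h
        exact hnm (List.mem_map.mpr ⟨x, hx, h⟩)
      · intro k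
        rw [PySem.Dict.get?_insert, hfa k]
        by_cases hk : k = pvKeyOf key_column r
        · subst hk; simp [hfil]
        · have : ¬ pvKeyOf key_column r = k := fun h => hk h.symm
          simp [hk, this, hs k]
      · intro k
        rw [hfa k]
        by_cases hk : k = pvKeyOf key_column r
        · subst hk
          have hgk : st.2.2.getD (pvKeyOf key_column r) [] = [] := by rw [hg, hfil]; rfl
          by_cases hv : pvValOf column r = ""
          · simp [hv, hfil]
          · simp only [ne_eq, hv, not_false_eq_true, if_true]
            rw [PySem.Dict.getD_modify_self, PySem.Dict.getD_insert]
            simp [hfil, hv]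
        · have hk' : ¬ pvKeyOf key_column r = k := fun h => hk h.symm
          by_cases hv : pvValOf column r = ""
          · simp [hv, hk', PySem.Dict.getD_insert, hk, hg k]
          · simp only [ne_eq, hv, not_false_eq_true, if_true]
            rw [PySem.Dict.getD_modify]
            simp [hk, hk', PySem.Dict.getD_insert, hg k]
    | some r0 =>
      have hne : l.filter (fun r' => pvKeyOf key_column r' == pvKeyOf key_column r) ≠ [] := by
        intro h; rw [h] at hhd; simp at hhd
      have hmem : pvKeyOf key_column r ∈ l.map (pvKeyOf key_column) := by
        obtain ⟨x, hx⟩ := List.exists_mem_of_ne_nil _ hne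
        have hx' := List.mem_filter.mp hx
        exact List.mem_map.mpr ⟨x, hx'.1, by simpa using hx'.2⟩
      have hct : st.1.contains (pvKeyOf key_column r) = true := by rw [hcont, hhd]; rfl
      rw [hct]
      simp only [if_true]
      refine ⟨?_, ?_, ?_⟩
      · rw [hofl, ho]
        simp [PySem.Set.add]
        obtain ⟨a, ha, he⟩ := List.mem_map.mp hmem
        exact ⟨a, ha, he⟩
      · intro k
        rw [hfa k, hs k]
        by_cases hk : pvKeyOf key_column r = k
        · subst hk
          rw [List.head?_append]
          cases hx : (l.filter (fun r' => pvKeyOf key_column r' == pvKeyOf key_column r)).head? with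
          | none => exact absurd (List.head?_eq_none_iff.mp hx) hne
          | some y => simp
        · simp [hk]
      · intro k
        rw [hfa k]
        by_cases hk : pvKeyOf key_column r = k
        · subst hk
          by_cases hv : pvValOf column r = ""
          · simp [hv, hg _]
          · simp only [ne_eq, hv, not_false_eq_true, if_true]
            rw [PySem.Dict.getD_modify_self]
            simp [hg _, hv]
        · by_cases hv : pvValOf column r = ""
          · simp [hv, hk, hg k]
          · simp only [ne_eq, hv, not_false_eq_true, if_true]
            rw [PySem.Dict.getD_modify]
            have hk2 : ¬ k = pvKeyOf key_column r := fun h => hk h.symm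
            simp [hk, hk2, hg k]

theorem collapse_column_eq_spec (rows : List (List (String × String))) (column key_column sep : String) :
    collapse_column rows column key_column sep = pvSpecList rows column key_column sep := by
  obtain ⟨ho, hs, hg⟩ := pvAFold_char column key_column rows
  unfold collapse_column pvSpecList
  simp only [ho]
  refine List.map_congr_left (fun k hk => ?_)
  have hmem : k ∈ rows.map (pvKeyOf key_column) := (PySem.Set.mem_ofList _ _).mp hk
  have hne : rows.filter (fun r => pvKeyOf key_column r == k) ≠ [] := by
    obtain ⟨r', hr', he⟩ := List.mem_map.mp hmem
    intro h
    exact (List.filter_eq_nil_iff.mp h r' hr') (by simp [he])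
  cases hhd : (rows.filter (fun r => pvKeyOf key_column r == k)).head? with
  | none => exact absurd (List.head?_eq_none_iff.mp hhd) hne
  | some r1 =>
    rw [hg k]
    have : (rows.foldl (pvAStep column key_column) (PySem.Dict.empty, [], PySem.Dict.empty)).1.getD k []
        = pvTmpl column r1 := by
      rw [PySem.Dict.getD_eq_get?_getD, hs k, hhd]; rfl
    rw [this, List.headD_eq_head?, hhd]
    rfl

-- folding Set.add over a list onto (a :: s): a stays in front and copies of a are dropped
theorem pvFoldlAdd_cons (a : String) (l : List String) : ∀ s : List String,
    l.foldl PySem.Set.add (a :: s) = a :: (l.filter (· ≠ a)).foldl PySem.Set.add s := by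
  induction l with
  | nil => intro s; rfl
  | cons x xs ih =>
    intro s
    by_cases hx : x = a
    · subst hx
      have hstep : PySem.Set.add (x :: s) x = x :: s := by
        simp [PySem.Set.add, PySem.Set.contains]
      simp [ih s]
    · have hstep : PySem.Set.add (a :: s) x = a :: PySem.Set.add s x := by
        by_cases hc : x ∈ s <;> simp [PySem.Set.add, PySem.Set.contains, hx, hc]
      simp only [List.foldl_cons, hstep, List.filter_cons]
      have hd : decide (x ≠ a) = true := by simp [hx]
      rw [hd]
      simp only [List.foldl_cons]
      exact ih (PySem.Set.add s x)

-- first-occurrence dedup peels off the head: set(a :: l) = a :: set(l with a removed)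
theorem pvOfList_cons_filter (a : String) (l : List String) :
    PySem.Set.ofList (a :: l) = a :: PySem.Set.ofList (l.filter (· ≠ a)) := by
  rw [PySem.Set.ofList_eq_foldl, PySem.Set.ofList_eq_foldl, List.foldl_cons]
  have h0 : PySem.Set.add ([] : List String) a = [a] := by
    simp [PySem.Set.add, PySem.Set.contains]
  rw [h0]
  exact pvFoldlAdd_cons a l []

-- mapping the key out of a row-level filter
theorem pvMap_filter_key (key_column : String) (key : String) (tl : List (List (String × String))) :
    (tl.filter (fun r => !(pvKeyOf key_column r == key))).map (pvKeyOf key_column)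
      = (tl.map (pvKeyOf key_column)).filter (· ≠ key) := by
  induction tl with
  | nil => rfl
  | cons r tl ih =>
    by_cases h : pvKeyOf key_column r = key
    · simp [List.map_cons, h, ih]
    · simp [List.map_cons, h, ih]

-- one round of B corresponds to peeling the first key group off the normal form
theorem pvSpecList_cons (first : List (String × String)) (tl : List (List (String × String)))
    (column key_column sep : String) :
    pvSpecList (first :: tl) column key_column sep
      = (pvTmpl column first ++
          [(column, PySem.Str.join sep
            (((first :: tl.filter (fun r => pvKeyOf key_column r == pvKeyOf key_column first)).map
                (pvValOf column)).filter (· ≠ "")))])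
        :: pvSpecList (tl.filter (fun r => !(pvKeyOf key_column r == pvKeyOf key_column first)))
             column key_column sep := by
  set key := pvKeyOf key_column first with hkey
  set rest := tl.filter (fun r => !(pvKeyOf key_column r == key)) with hrest
  unfold pvSpecList
  have hof : PySem.Set.ofList ((first :: tl).map (pvKeyOf key_column))
      = key :: PySem.Set.ofList (rest.map (pvKeyOf key_column)) := by
    rw [List.map_cons, ← hkey, pvOfList_cons_filter, hrest, pvMap_filter_key]
  rw [hof, List.map_cons]
  congr 1
  · -- the head group: rows with the first row's key
    have hfil : (first :: tl).filter (fun r => pvKeyOf key_column r == key)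
        = first :: tl.filter (fun r => pvKeyOf key_column r == key) := by
      simp [hkey]
    rw [hfil]
    rfl
  · -- remaining keys: filtering over first :: tl equals filtering over rest
    refine List.map_congr_left (fun k hk => ?_)
    have hkne : k ≠ key := by
      have hm : k ∈ rest.map (pvKeyOf key_column) := (PySem.Set.mem_ofList _ _).mp hk
      obtain ⟨r, hr, he⟩ := List.mem_map.mp hm
      have := (List.mem_filter.mp hr).2
      intro h; rw [he, h] at this; simp at this
    have hfe : (first :: tl).filter (fun r => pvKeyOf key_column r == k)
        = rest.filter (fun r => pvKeyOf key_column r == k) := by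
      rw [hrest, List.filter_filter]
      rw [List.filter_cons]
      have h1 : ((pvKeyOf key_column first == k) : Bool) = false := by
        simp [← hkey]; exact fun h => hkne h.symm
      rw [h1]
      simp only [Bool.false_eq_true, if_false]
      refine List.filter_congr (fun r _ => ?_)
      by_cases h2 : pvKeyOf key_column r = k
      · simp [h2, hkne]
      · simp [h2]
    rw [hfe]

theorem collapse_column_alt_eq_spec (rows : List (List (String × String))) (column key_column sep : String) :
    collapse_column_alt rows column key_column sep = pvSpecList rows column key_column sep := by
  have main : ∀ (n : Nat) (l : List (List (String × String))), l.length ≤ n →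
      collapse_column_alt l column key_column sep = pvSpecList l column key_column sep := by
    intro n
    induction n with
    | zero =>
      intro l hl
      have : l = [] := List.eq_nil_of_length_eq_zero (Nat.le_zero.mp hl)
      subst this
      rw [collapse_column_alt]
      rfl
    | succ n ih =>
      intro l hl
      cases l with
      | nil => rw [collapse_column_alt]; rfl
      | cons first tl =>
        rw [collapse_column_alt]
        simp only [List.partition_eq_filter_filter]
        rw [pvSpecList_cons]
        have hlen : (tl.filter (fun r => !(pvKeyOf key_column r == pvKeyOf key_column first))).length ≤ n := by
          calc _ ≤ tl.length := List.length_filter_le _ _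
            _ ≤ n := Nat.le_of_succ_le_succ hl
        exact congrArg₂ List.cons rfl (ih _ hlen)
  exact main rows.length rows (Nat.le_refl _)

-- ===== VERDICT (by name: the statement is the Claim_ definition above) =====
theorem collapse_column_spec : Claim_equal_collapse_column := by
  intro rows column key_column sep _
  unfold Spec_collapse_column
  rw [collapse_column_eq_spec, collapse_column_alt_eq_spec]
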